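-- pv_equiv track=rewrite | github.com/vqdung71104/student-management | backend/app/services/preference_filter.py | _boost_preferred_teachers
-- ===== SOURCE A (Python) =====
-- from typing import List, Dict, Optional
--
-- def _boost_preferred_teachers(classes: List[Dict], preferred_teachers: List[str]) -> List[Dict]:
--     """
--     Boost classes with preferred teachers (soft filter)
--     Put preferred teachers first, but keep others
--     """
--     preferred = []
--     others = []
--
--     for cls in classes:
--         teacher_name = cls.get('teacher_name', '').lower()
--
--         # Check if teacher is in preferred list
--         is_preferred = any(
--             pref.lower() in teacher_name or teacher_name in pref.lower()
--             for pref in preferred_teachers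
--         )
--
--         if is_preferred:
--             preferred.append(cls)
--         else:
--             others.append(cls)
--
--     # Return preferred first, then others
--     return preferred + others
-- ===== SOURCE B (Python) =====
-- from typing import List, Dict
--
-- def _boost_preferred_teachers(classes: List[Dict], preferred_teachers: List[str]) -> List[Dict]:
--     """Preferred-teacher classes first, others after, each group in original order."""
--     def is_preferred(cls):
--         teacher_name = cls.get('teacher_name', '').lower()
--         return any(pref.lower() in teacher_name or teacher_name in pref.lower()
--                    for pref in preferred_teachers)
--     return sorted(classes, key=lambda cls: 0 if is_preferred(cls) else 1)
-- ===== Notes on version B (the rewrite author's own statement) =====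
-- stated objective: idiomatic
-- what changed: Replaces the two-accumulator partition loop with a single stable sort on a 0/1 preferred-match key, relying on sort stability to keep each group's original order.
import Mathlib
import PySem

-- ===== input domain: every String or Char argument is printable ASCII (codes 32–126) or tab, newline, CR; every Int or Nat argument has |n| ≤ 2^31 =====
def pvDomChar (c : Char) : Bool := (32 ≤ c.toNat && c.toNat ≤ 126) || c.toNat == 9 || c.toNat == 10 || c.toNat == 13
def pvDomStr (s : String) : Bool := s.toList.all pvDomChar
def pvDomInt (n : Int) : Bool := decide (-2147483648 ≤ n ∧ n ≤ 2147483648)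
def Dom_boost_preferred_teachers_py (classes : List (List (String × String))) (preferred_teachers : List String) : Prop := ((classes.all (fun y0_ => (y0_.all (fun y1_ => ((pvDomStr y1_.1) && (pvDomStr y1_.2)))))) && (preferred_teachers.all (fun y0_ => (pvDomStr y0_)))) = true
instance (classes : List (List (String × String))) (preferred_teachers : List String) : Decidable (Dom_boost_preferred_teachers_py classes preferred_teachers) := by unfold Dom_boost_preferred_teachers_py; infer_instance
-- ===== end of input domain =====

-- B replaces A's two-accumulator partition loop with one stable sort on a 0/1 preferred-match key (idiomatic; same result, same within-group order).

-- ===== PORT A =====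
def boost_preferred_teachers_py (classes : List (List (String × String))) (preferred_teachers : List String) : List (List (String × String)) :=
  -- preferred = [] ; others = [] ; for cls in classes: … ; return preferred + others
  let r := classes.foldl
    (fun (acc : List (List (String × String)) × List (List (String × String))) cls =>
      let teacher_name := PySem.Str.lower (PySem.Dict.getD (PySem.Dict.mk cls) "teacher_name" "")
      let is_preferred := preferred_teachers.any (fun pref =>
        PySem.Str.isIn (PySem.Str.lower pref) teacher_name ||
        PySem.Str.isIn teacher_name (PySem.Str.lower pref))
      if is_preferred then (acc.1 ++ [cls], acc.2) else (acc.1, acc.2 ++ [cls]))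
    ([], [])
  r.1 ++ r.2

-- ===== PORT B =====
def bpt_isPreferred (preferred_teachers : List String) (cls : List (String × String)) : Bool :=
  let teacher_name := PySem.Str.lower (PySem.Dict.getD (PySem.Dict.mk cls) "teacher_name" "")
  preferred_teachers.any (fun pref =>
    PySem.Str.isIn (PySem.Str.lower pref) teacher_name ||
    PySem.Str.isIn teacher_name (PySem.Str.lower pref))

def boost_preferred_teachers_py_alt (classes : List (List (String × String))) (preferred_teachers : List String) : List (List (String × String)) :=
  -- sorted(classes, key=lambda cls: 0 if is_preferred(cls) else 1)  — stable
  PySem.List.sorted classes (fun cls => if bpt_isPreferred preferred_teachers cls then (0 : Int) else 1) false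

-- ===== PRECONDITION & SPEC =====
def Spec_boost_preferred_teachers_py (classes : List (List (String × String))) (preferred_teachers : List String) (out : List (List (String × String))) : Prop := out = boost_preferred_teachers_py_alt classes preferred_teachers
instance (classes : List (List (String × String))) (preferred_teachers : List String) (out : List (List (String × String))) : Decidable (Spec_boost_preferred_teachers_py classes preferred_teachers out) := by unfold Spec_boost_preferred_teachers_py; infer_instance

-- ===== CLAIM (what is proved, stated in full; the proofs are below) =====
def Claim_equal_boost_preferred_teachers_py : Prop := ∀ (classes : List (List (String × String))) (preferred_teachers : List String), Dom_boost_preferred_teachers_py classes preferred_teachers → Spec_boost_preferred_teachers_py classes preferred_teachers (boost_preferred_teachers_py classes preferred_teachers)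

-- ===== LEMMAS AND PROOFS =====

-- A's loop is the partition into (filter q, filter ¬q)
theorem bpt_foldA (pts : List String) (xs : List (List (String × String)))
    (p o : List (List (String × String))) :
    xs.foldl
      (fun (acc : List (List (String × String)) × List (List (String × String))) cls =>
        let teacher_name := PySem.Str.lower (PySem.Dict.getD (PySem.Dict.mk cls) "teacher_name" "")
        let is_preferred := pts.any (fun pref =>
          PySem.Str.isIn (PySem.Str.lower pref) teacher_name ||
          PySem.Str.isIn teacher_name (PySem.Str.lower pref))
        if is_preferred then (acc.1 ++ [cls], acc.2) else (acc.1, acc.2 ++ [cls]))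
      (p, o)
      = (p ++ xs.filter (bpt_isPreferred pts), o ++ xs.filter (fun c => !bpt_isPreferred pts c)) := by
  induction xs generalizing p o with
  | nil => simp
  | cons x xs ih =>
    by_cases hx : bpt_isPreferred pts x
    · simp only [List.foldl_cons, List.filter_cons]
      rw [show (pts.any (fun pref =>
          PySem.Str.isIn (PySem.Str.lower pref) (PySem.Str.lower (PySem.Dict.getD (PySem.Dict.mk x) "teacher_name" "")) ||
          PySem.Str.isIn (PySem.Str.lower (PySem.Dict.getD (PySem.Dict.mk x) "teacher_name" "")) (PySem.Str.lower pref)))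
          = bpt_isPreferred pts x from rfl, hx]
      simp only [if_pos, Bool.not_true, ih, List.append_assoc]
      simp [hx]
    · simp only [List.foldl_cons, List.filter_cons]
      rw [show (pts.any (fun pref =>
          PySem.Str.isIn (PySem.Str.lower pref) (PySem.Str.lower (PySem.Dict.getD (PySem.Dict.mk x) "teacher_name" "")) ||
          PySem.Str.isIn (PySem.Str.lower (PySem.Dict.getD (PySem.Dict.mk x) "teacher_name" "")) (PySem.Str.lower pref)))
          = bpt_isPreferred pts x from rfl]
      simp only [hx, Bool.false_eq_true, if_false, ih, List.append_assoc]
      simp [hx]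

-- inserting a preferred element into P(all preferred) ++ Q(all not) lands between P and Q
theorem bpt_insert_pref (q : List (String × String) → Bool)
    (x : List (String × String)) (P Q : List (List (String × String)))
    (hx : q x = true) (hP : ∀ y ∈ P, q y = true) (hQ : ∀ y ∈ Q, q y = false) :
    PySem.List.insertBy (fun a b => decide ((if q a then (0:Int) else 1) < (if q b then (0:Int) else 1))) x (P ++ Q)
      = P ++ x :: Q := by
  induction P with
  | nil =>
    cases Q with
    | nil => simp [PySem.List.insertBy]
    | cons y ys =>
      have hy : q y = false := hQ y (by simp)
      simp [PySem.List.insertBy, hx, hy]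
  | cons p ps ih =>
    have hp : q p = true := hP p (by simp)
    simp only [List.cons_append, PySem.List.insertBy, hx, hp]
    simp only [if_true, decide_eq_true_eq]
    rw [if_neg (by omega)]
    simp only [List.cons.injEq, true_and]
    exact ih (fun y hy => hP y (by simp [hy]))

-- inserting a non-preferred element appends at the end
theorem bpt_insert_other (q : List (String × String) → Bool)
    (x : List (String × String)) (L : List (List (String × String)))
    (hx : q x = false) :
    PySem.List.insertBy (fun a b => decide ((if q a then (0:Int) else 1) < (if q b then (0:Int) else 1))) x L
      = L ++ [x] := by
  apply PySem.List.insertBy_of_forall_not_before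
  intro y _
  simp only [hx, Bool.false_eq_true, if_false, decide_eq_false_iff_not, not_lt]
  split <;> omega

-- the insertion-sort fold keeps the partition invariant
theorem bpt_foldB (q : List (String × String) → Bool)
    (xs : List (List (String × String)))
    (P Q : List (List (String × String)))
    (hP : ∀ y ∈ P, q y = true) (hQ : ∀ y ∈ Q, q y = false) :
    xs.foldl (fun acc x =>
        PySem.List.insertBy (fun a b => decide ((if q a then (0:Int) else 1) < (if q b then (0:Int) else 1))) x acc)
      (P ++ Q)
      = (P ++ xs.filter q) ++ (Q ++ xs.filter (fun c => !q c)) := by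
  induction xs generalizing P Q with
  | nil => simp
  | cons x xs ih =>
    by_cases hx : q x = true
    · have hP' : ∀ y ∈ P ++ [x], q y = true := by
        intro y hy
        rcases List.mem_append.mp hy with h | h
        · exact hP y h
        · simp at h; subst h; exact hx
      rw [List.foldl_cons, bpt_insert_pref q x P Q hx hP hQ,
        show P ++ x :: Q = (P ++ [x]) ++ Q by simp, ih (P ++ [x]) Q hP' hQ]
      simp [List.filter_cons, hx]
    · have hQ' : ∀ y ∈ Q ++ [x], q y = false := by
        intro y hy
        rcases List.mem_append.mp hy with h | h
        · exact hQ y h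
        · simp at h; subst h; simpa using hx
      rw [List.foldl_cons, bpt_insert_other q x (P ++ Q) (by simpa using hx), List.append_assoc,
        ih P (Q ++ [x]) hP hQ']
      simp [List.filter_cons, hx]

-- ===== VERDICT (by name: the statement is the Claim_ definition above) =====
theorem boost_preferred_teachers_py_spec : Claim_equal_boost_preferred_teachers_py := by
  intro classes pts _
  show boost_preferred_teachers_py classes pts = boost_preferred_teachers_py_alt classes pts
  unfold boost_preferred_teachers_py boost_preferred_teachers_py_alt PySem.List.sorted
  rw [bpt_foldA pts classes [] []]
  simpa using (bpt_foldB (bpt_isPreferred pts) classes [] [] (by simp) (by simp)).symm
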